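-- pv_equiv track=rewrite | github.com/dancing-bear-show/dancing-bear | mail/outlook/helpers.py | _find_outlook_account
-- ===== SOURCE A (Python) =====
-- from typing import Optional, Tuple
--
-- def _find_outlook_account(accounts: list, account_name: Optional[str]) -> Optional[dict]:
--     """Find an Outlook account by name or default to first Outlook account."""
--     if not accounts:
--         return None
--     if account_name:
--         chosen = next((a for a in accounts if a.get("name") == account_name), None)
--         if chosen:
--             return chosen
--     return next((a for a in accounts if (a.get("provider") or "").lower() == "outlook"), None)
-- ===== SOURCE B (Python) =====
-- from typing import Optional
--
-- def _find_outlook_account(accounts: list, account_name: Optional[str]) -> Optional[dict]: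
--     """Single pass: track first name match and first outlook account simultaneously."""
--     if not accounts:
--         return None
--     name_match = None
--     outlook_match = None
--     for a in accounts:
--         if name_match is None and account_name and a.get("name") == account_name:
--             name_match = a
--         if outlook_match is None and (a.get("provider") or "").lower() == "outlook":
--             outlook_match = a
--     return name_match if name_match is not None else outlook_match
-- ===== Notes on version B (the rewrite author's own statement) =====
-- stated objective: alternative
-- what changed: Replaced A's two sequential filtered scans (next(...) over a name generator, then next(...) over a provider generator) with one loop that fills two write-once candidate slots (first name match, first outlook match) in a single traversal.
import Mathlib
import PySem

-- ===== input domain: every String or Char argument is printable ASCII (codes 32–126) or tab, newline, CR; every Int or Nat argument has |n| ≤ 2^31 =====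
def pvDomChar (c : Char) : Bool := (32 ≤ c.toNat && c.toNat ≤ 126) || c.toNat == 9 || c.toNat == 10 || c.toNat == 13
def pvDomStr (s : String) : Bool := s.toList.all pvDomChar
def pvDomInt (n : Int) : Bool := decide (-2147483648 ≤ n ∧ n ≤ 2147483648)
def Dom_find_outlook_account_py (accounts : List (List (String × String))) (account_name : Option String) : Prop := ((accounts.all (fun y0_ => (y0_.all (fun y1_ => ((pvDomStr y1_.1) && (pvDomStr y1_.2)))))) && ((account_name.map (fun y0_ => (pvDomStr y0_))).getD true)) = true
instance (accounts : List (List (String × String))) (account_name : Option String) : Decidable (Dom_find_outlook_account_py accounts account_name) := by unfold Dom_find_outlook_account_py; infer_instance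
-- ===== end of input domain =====

-- B replaces A's two sequential filtered scans with one traversal filling two write-once candidate slots (alternative decomposition, same cost).


-- ===== PORT A =====
-- a.get(k): first match in the association list (dicts have unique keys, so first match is the match)
def pvGetKey (a : List (String × String)) (k : String) : Option String :=
  (a.find? (fun p => p.1 == k)).map (·.2)

-- account_name truthiness: not None and not ""
def pvTruthy (account_name : Option String) : Bool :=
  match account_name with
  | none => false
  | some s => !(s == "")

def find_outlook_account_py (accounts : List (List (String × String))) (account_name : Option String) : Option (List (String × String)) :=
  if accounts = [] then none
  else
    let fallback := accounts.find? (fun a => PySem.Str.lower ((pvGetKey a "provider").getD "") == "outlook")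
    if pvTruthy account_name then
      match accounts.find? (fun a => pvGetKey a "name" == account_name) with
      | some chosen => if chosen ≠ [] then some chosen else fallback   -- `if chosen:` (empty dict is falsy)
      | none => fallback
    else fallback

-- ===== PORT B =====
-- one step of B's loop: fill each slot only if still empty
def pvStepB (account_name : Option String) (s : Option (List (String × String)) × Option (List (String × String)))
    (a : List (String × String)) : Option (List (String × String)) × Option (List (String × String)) :=
  ( if s.1 = none ∧ pvTruthy account_name ∧ pvGetKey a "name" == account_name then some a else s.1,
    if s.2 = none ∧ PySem.Str.lower ((pvGetKey a "provider").getD "") == "outlook" then some a else s.2 )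

def find_outlook_account_py_alt (accounts : List (List (String × String))) (account_name : Option String) : Option (List (String × String)) :=
  if accounts = [] then none
  else
    let r := accounts.foldl (pvStepB account_name) (none, none)
    match r.1 with
    | some d => some d
    | none => r.2

-- ===== PRECONDITION & SPEC =====
def Spec_find_outlook_account_py (accounts : List (List (String × String))) (account_name : Option String) (out : Option (List (String × String))) : Prop := out = find_outlook_account_py_alt accounts account_name
instance (accounts : List (List (String × String))) (account_name : Option String) (out : Option (List (String × String))) : Decidable (Spec_find_outlook_account_py accounts account_name out) := by unfold Spec_find_outlook_account_py; infer_instance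

-- ===== CLAIM (what is proved, stated in full; the proofs are below) =====
def Claim_equal_find_outlook_account_py : Prop := ∀ (accounts : List (List (String × String))) (account_name : Option String), Dom_find_outlook_account_py accounts account_name → Spec_find_outlook_account_py accounts account_name (find_outlook_account_py accounts account_name)

-- ===== LEMMAS AND PROOFS =====

-- B's fold computes, in each slot, the first element satisfying that slot's predicate.
theorem foldl_stepB (account_name : Option String) (l : List (List (String × String)))
    (nm om : Option (List (String × String))) :
    l.foldl (pvStepB account_name) (nm, om) =
      ( (match nm with
         | some d => some d
         | none => l.find? (fun a => pvTruthy account_name && (pvGetKey a "name" == account_name))),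
        (match om with
         | some d => some d
         | none => l.find? (fun a => PySem.Str.lower ((pvGetKey a "provider").getD "") == "outlook")) ) := by
  induction l generalizing nm om with
  | nil => cases nm <;> cases om <;> rfl
  | cons a t ih =>
    simp only [List.foldl_cons, pvStepB, ih, List.find?]
    cases hp : (pvTruthy account_name && (pvGetKey a "name" == account_name)) <;>
      cases hq : (PySem.Str.lower ((pvGetKey a "provider").getD "") == "outlook") <;>
        cases nm <;> cases om <;> simp_all <;>
          rw [if_neg (fun h => hp h.1 h.2)]
-- if the name predicate holds of a, then a has a "name" entry, hence a ≠ []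
theorem name_match_ne_nil (account_name : Option String) (a : List (String × String))
    (h : (pvTruthy account_name && (pvGetKey a "name" == account_name)) = true) : a ≠ [] := by
  rintro rfl
  cases account_name with
  | none => simp [pvTruthy] at h
  | some s => simp [pvTruthy, pvGetKey, List.find?] at h

-- ===== VERDICT (by name: the statement is the Claim_ definition above) =====
theorem find_outlook_account_py_spec : Claim_equal_find_outlook_account_py := by
  intro accounts account_name _
  unfold Spec_find_outlook_account_py find_outlook_account_py find_outlook_account_py_alt
  by_cases hnil : accounts = []
  · simp [hnil]
  · simp only [if_neg hnil, foldl_stepB]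
    by_cases ht : pvTruthy account_name = true
    · simp only [if_pos ht]
      have hpred : (fun a => pvTruthy account_name && (pvGetKey a "name" == account_name))
          = (fun (a : List (String × String)) => pvGetKey a "name" == account_name) := by
        funext a; simp [ht]
      rw [hpred]
      cases hc : accounts.find? (fun a => pvGetKey a "name" == account_name) with
      | none => simp
      | some chosen =>
        have hp := List.find?_some hc
        have hne : chosen ≠ [] := name_match_ne_nil account_name chosen (by simp [ht, hp])
        simp [hne]
    · have ht' : pvTruthy account_name = false := by simpa using ht
      have hfind : accounts.find? (fun a => pvTruthy account_name && (pvGetKey a "name" == account_name)) = none := by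
        rw [List.find?_eq_none]; intro a _; simp [ht']
      rw [hfind]
      simp [ht']
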